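-- pv_equiv track=rewrite | github.com/zy538324/HomeGrubHub-Staging | recipe_app/config/tiers.py | get_available_features
-- ===== SOURCE A (Python) =====
-- TIERS = {
--     'free': {
--         'basic_recipes', 'search', 'public_recipes', 'basic_filtering',
--         'recipe_reviews_read', 'upload_recipes', 'community_features',
--         'recipe_reviews', 'recipe_collections', 'cooking_challenges',
--         'social_features'
--     },
--     'home': {
--         'unlimited_recipes', 'private_recipes', 'basic_tools', 'import_recipes',
--         'advanced_filtering', 'nutrition_analysis', 'equipment_filtering',
--         'smart_substitutions', 'price_comparison_trends',
--         'budget_suggestions_dynamic', 'meal_planning_advanced', 'batch_cooking',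
--         'voice_assistant', 'offline_recipes_themed', 'community_photos',
--         'seasonal_suggestions', 'priority_support', 'pantry_tracker',
--         'url_import', 'meal_planning', 'shopping_list_generation',
--         'meal_planning_basic'
--     },
--     'family': {
--         'multi_user', 'family_sharing', 'price_comparison_multi',
--         'budget_suggestions', 'pantry_tracker_family', 'dynamic_budget_alerts'
--     },
--     'pro': {
--         'pantry_tracker_predictive', 'barcode_scanning',
--         'priority_chat_support', 'smart_consumption_forecasting',
--         'multi_store_price_comparison', 'advanced_analytics',
--         'premium_content'
--     }
-- }
--
-- TIER_ORDER = ['free', 'home', 'family', 'pro']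
--
-- def get_available_features(user_tier: str):
--     """Return cumulative feature set for the given tier."""
--     tier = (user_tier or 'free').lower()
--     features = set()
--     for t in TIER_ORDER:
--         features |= TIERS.get(t, set())
--         if t == tier:
--             break
--     return features
-- ===== SOURCE B (Python) =====
-- # B: precomputed cumulative table (one forward pass at module load); lookup instead of loop.
-- TIERS = {
--     'free': {
--         'basic_recipes', 'search', 'public_recipes', 'basic_filtering',
--         'recipe_reviews_read', 'upload_recipes', 'community_features',
--         'recipe_reviews', 'recipe_collections', 'cooking_challenges',
--         'social_features'
--     },
--     'home': {
--         'unlimited_recipes', 'private_recipes', 'basic_tools', 'import_recipes',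
--         'advanced_filtering', 'nutrition_analysis', 'equipment_filtering',
--         'smart_substitutions', 'price_comparison_trends',
--         'budget_suggestions_dynamic', 'meal_planning_advanced', 'batch_cooking',
--         'voice_assistant', 'offline_recipes_themed', 'community_photos',
--         'seasonal_suggestions', 'priority_support', 'pantry_tracker',
--         'url_import', 'meal_planning', 'shopping_list_generation',
--         'meal_planning_basic'
--     },
--     'family': {
--         'multi_user', 'family_sharing', 'price_comparison_multi',
--         'budget_suggestions', 'pantry_tracker_family', 'dynamic_budget_alerts'
--     },
--     'pro': {
--         'pantry_tracker_predictive', 'barcode_scanning',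
--         'priority_chat_support', 'smart_consumption_forecasting',
--         'multi_store_price_comparison', 'advanced_analytics',
--         'premium_content'
--     }
-- }
--
-- TIER_ORDER = ['free', 'home', 'family', 'pro']
--
-- _CUMULATIVE = {}
-- _acc = set()
-- for _t in TIER_ORDER:
--     _acc = _acc | TIERS.get(_t, set())
--     _CUMULATIVE[_t] = _acc
-- _DEFAULT = _acc  # unknown tiers fall through to the union of everything, as in A
--
--
-- def get_available_features(user_tier: str):
--     """Return cumulative feature set for the given tier."""
--     tier = (user_tier or 'free').lower()
--     return _CUMULATIVE.get(tier, _DEFAULT)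
-- ===== Notes on version B (the rewrite author's own statement) =====
-- stated objective: alternative
-- what changed: Replaced A's per-call accumulating loop over TIER_ORDER with a module-level precomputed cumulative dict (one forward pass of running unions), so get_available_features becomes a single table lookup whose default (the full union) reproduces A's fall-through for unknown tiers.
import Mathlib
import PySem

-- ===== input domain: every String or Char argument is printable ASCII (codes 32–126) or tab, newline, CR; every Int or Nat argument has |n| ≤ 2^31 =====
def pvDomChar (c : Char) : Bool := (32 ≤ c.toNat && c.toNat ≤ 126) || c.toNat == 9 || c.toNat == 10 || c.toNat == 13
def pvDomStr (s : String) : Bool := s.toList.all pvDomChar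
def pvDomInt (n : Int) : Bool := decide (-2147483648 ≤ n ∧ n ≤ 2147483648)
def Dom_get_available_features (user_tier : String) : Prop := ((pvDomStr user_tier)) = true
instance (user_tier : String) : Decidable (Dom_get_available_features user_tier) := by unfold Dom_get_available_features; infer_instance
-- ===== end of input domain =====

-- B replaces A's accumulating loop-with-break by a module-level precomputed cumulative table and a single lookup (objective: alternative/idiomatic).

-- ===== PORT A =====
def pvTIERS : PySem.Dict String (PySem.Set String) := PySem.Dict.ofList [
  ("free", PySem.Set.ofList [
    "basic_recipes", "search", "public_recipes", "basic_filtering",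
    "recipe_reviews_read", "upload_recipes", "community_features",
    "recipe_reviews", "recipe_collections", "cooking_challenges",
    "social_features"]),
  ("home", PySem.Set.ofList [
    "unlimited_recipes", "private_recipes", "basic_tools", "import_recipes",
    "advanced_filtering", "nutrition_analysis", "equipment_filtering",
    "smart_substitutions", "price_comparison_trends",
    "budget_suggestions_dynamic", "meal_planning_advanced", "batch_cooking",
    "voice_assistant", "offline_recipes_themed", "community_photos",
    "seasonal_suggestions", "priority_support", "pantry_tracker",
    "url_import", "meal_planning", "shopping_list_generation",
    "meal_planning_basic"]),
  ("family", PySem.Set.ofList [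
    "multi_user", "family_sharing", "price_comparison_multi",
    "budget_suggestions", "pantry_tracker_family", "dynamic_budget_alerts"]),
  ("pro", PySem.Set.ofList [
    "pantry_tracker_predictive", "barcode_scanning",
    "priority_chat_support", "smart_consumption_forecasting",
    "multi_store_price_comparison", "advanced_analytics",
    "premium_content"])]

def pvTIER_ORDER : List String := ["free", "home", "family", "pro"]

-- A's loop with break, as structural recursion over TIER_ORDER
def pvLoopA (tier : String) : List String → PySem.Set String → PySem.Set String
  | [], features => features
  | t :: ts, features =>
    let features' := PySem.Set.union features (PySem.Dict.getD pvTIERS t PySem.Set.empty)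
    if t == tier then features' else pvLoopA tier ts features'

def get_available_features (user_tier : String) : List String :=
  let tier := PySem.Str.lower (if user_tier == "" then "free" else user_tier)
  pvLoopA tier pvTIER_ORDER PySem.Set.empty

-- ===== PORT B =====
-- module-level forward pass building the cumulative table (Source B's _CUMULATIVE / _DEFAULT)
def pvCumPass : PySem.Dict String (PySem.Set String) × PySem.Set String :=
  pvTIER_ORDER.foldl
    (fun (p : PySem.Dict String (PySem.Set String) × PySem.Set String) t =>
      let acc := PySem.Set.union p.2 (PySem.Dict.getD pvTIERS t PySem.Set.empty)
      (p.1.insert t acc, acc))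
    (PySem.Dict.empty, PySem.Set.empty)

def pvCUMULATIVE : PySem.Dict String (PySem.Set String) := pvCumPass.1
def pvDEFAULT : PySem.Set String := pvCumPass.2

def get_available_features_alt (user_tier : String) : List String :=
  let tier := PySem.Str.lower (if user_tier == "" then "free" else user_tier)
  PySem.Dict.getD pvCUMULATIVE tier pvDEFAULT

-- ===== PRECONDITION & SPEC =====
def Spec_get_available_features (user_tier : String) (out : List String) : Prop := out = get_available_features_alt user_tier
instance (user_tier : String) (out : List String) : Decidable (Spec_get_available_features user_tier out) := by unfold Spec_get_available_features; infer_instance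

-- ===== CLAIM (what is proved, stated in full; the proofs are below) =====
def Claim_equal_get_available_features : Prop := ∀ (user_tier : String), Dom_get_available_features user_tier → Spec_get_available_features user_tier (get_available_features user_tier)

-- ===== LEMMAS AND PROOFS =====

-- the one step of B's module-level forward pass (pvCumPass's folded function, named for the lemmas)
def pvStep (p : PySem.Dict String (PySem.Set String) × PySem.Set String) (t : String) :
    PySem.Dict String (PySem.Set String) × PySem.Set String :=
  let acc := PySem.Set.union p.2 (PySem.Dict.getD pvTIERS t PySem.Set.empty)
  (p.1.insert t acc, acc)

-- a key not touched by the rest of the pass keeps its entry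
theorem pvFold_get?_preserved (k : String) (v : PySem.Set String) :
    ∀ (ts : List String) (d : PySem.Dict String (PySem.Set String)) (acc : PySem.Set String),
      d.get? k = some v → k ∉ ts → ((ts.foldl pvStep (d, acc)).1).get? k = some v := by
  intro ts
  induction ts with
  | nil => intro d acc h _; exact h
  | cons t ts ih =>
    intro d acc h hk
    simp only [List.mem_cons, not_or] at hk
    simp only [List.foldl_cons, pvStep]
    exact ih _ _ (by rw [PySem.Dict.get?_insert_of_ne _ _ hk.1]; exact h) hk.2

-- A's loop-with-break agrees with a lookup in the table B's pass builds
theorem pvLoop_eq_fold (tier : String) :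
    ∀ (ts : List String), ts.Nodup →
      ∀ (d : PySem.Dict String (PySem.Set String)) (acc : PySem.Set String),
        d.get? tier = none →
        pvLoopA tier ts acc =
          PySem.Dict.getD ((ts.foldl pvStep (d, acc)).1) tier ((ts.foldl pvStep (d, acc)).2) := by
  intro ts
  induction ts with
  | nil =>
    intro _ d acc h
    simp [pvLoopA, PySem.Dict.getD, h]
  | cons t ts ih =>
    intro hnd d acc h
    simp only [List.nodup_cons] at hnd
    by_cases htr : t = tier
    · subst htr
      simp only [pvLoopA, List.foldl_cons, pvStep, beq_self_eq_true, if_true]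
      have hpres := pvFold_get?_preserved t (acc.union (pvTIERS.getD t PySem.Set.empty)) ts
        (d.insert t (acc.union (pvTIERS.getD t PySem.Set.empty)))
        (acc.union (pvTIERS.getD t PySem.Set.empty))
        (PySem.Dict.get?_insert_self d t _) hnd.1
      simp only [PySem.Dict.getD, PySem.Set.empty] at hpres
      simp [PySem.Dict.getD, PySem.Set.empty, hpres]
    · simp only [pvLoopA, List.foldl_cons, pvStep]
      rw [if_neg (by simpa using htr)]
      exact ih hnd.2 _ _ (by rw [PySem.Dict.get?_insert_of_ne _ _ (Ne.symm htr)]; exact h)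

-- core agreement for every possible normalized tier string
theorem pvCore_eq (tier : String) :
    pvLoopA tier pvTIER_ORDER PySem.Set.empty = PySem.Dict.getD pvCUMULATIVE tier pvDEFAULT := by
  have hfold : pvCumPass = pvTIER_ORDER.foldl pvStep (PySem.Dict.empty, PySem.Set.empty) := rfl
  have hnd : pvTIER_ORDER.Nodup := by decide
  have h := pvLoop_eq_fold tier pvTIER_ORDER hnd PySem.Dict.empty PySem.Set.empty (by
    simp [PySem.Dict.empty, PySem.Dict.get?])
  rw [h, pvCUMULATIVE, pvDEFAULT, hfold]

-- ===== VERDICT (by name: the statement is the Claim_ definition above) =====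
theorem get_available_features_spec : Claim_equal_get_available_features := by
  intro user_tier _
  unfold Spec_get_available_features get_available_features get_available_features_alt
  exact pvCore_eq _
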